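-- pv_equiv track=rewrite | github.com/pathwaycom/pathway | python/pathway/tests/test_persistence_iterate.py | _compute_expected_diffs
-- ===== SOURCE A (Python) =====
-- def _compute_expected_diffs(old_rows: set, new_rows: set) -> set:
--     """Compute expected CSV output from old→new state transition.
--
--     Returns set of strings like "10,a,10,-1" or "10,a,10,1".
--     Each row exists at most once, so diffs are exactly +1 or -1.
--     """
--     removed = old_rows - new_rows
--     added = new_rows - old_rows
--     expected = set()
--     for event_time, data, cs in removed:
--         expected.add(f"{event_time},{data},{cs},-1")
--     for event_time, data, cs in added:
--         expected.add(f"{event_time},{data},{cs},1")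
--     return expected
-- ===== SOURCE B (Python) =====
-- def _compute_expected_diffs(old_rows: set, new_rows: set) -> set:
--     """Tally every row in one signed counter (-1 per old row, +1 per new row);
--     the rows with a nonzero net count are exactly the diffs and the count is the sign."""
--     counts = {}
--     for row in old_rows:
--         counts[row] = counts.get(row, 0) - 1
--     for row in new_rows:
--         counts[row] = counts.get(row, 0) + 1
--     return {
--         f"{event_time},{data},{cs},{n}"
--         for (event_time, data, cs), n in counts.items()
--         if n != 0
--     }
-- ===== Notes on version B (the rewrite author's own statement) =====
-- stated objective: alternative
-- what changed: B replaces A's two set differences and two formatting loops by a single signed counter dictionary (-1 per old row, +1 per new row) and then emits one formatted string per entry with a nonzero net count, using that count directly as the printed sign.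
import Mathlib
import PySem

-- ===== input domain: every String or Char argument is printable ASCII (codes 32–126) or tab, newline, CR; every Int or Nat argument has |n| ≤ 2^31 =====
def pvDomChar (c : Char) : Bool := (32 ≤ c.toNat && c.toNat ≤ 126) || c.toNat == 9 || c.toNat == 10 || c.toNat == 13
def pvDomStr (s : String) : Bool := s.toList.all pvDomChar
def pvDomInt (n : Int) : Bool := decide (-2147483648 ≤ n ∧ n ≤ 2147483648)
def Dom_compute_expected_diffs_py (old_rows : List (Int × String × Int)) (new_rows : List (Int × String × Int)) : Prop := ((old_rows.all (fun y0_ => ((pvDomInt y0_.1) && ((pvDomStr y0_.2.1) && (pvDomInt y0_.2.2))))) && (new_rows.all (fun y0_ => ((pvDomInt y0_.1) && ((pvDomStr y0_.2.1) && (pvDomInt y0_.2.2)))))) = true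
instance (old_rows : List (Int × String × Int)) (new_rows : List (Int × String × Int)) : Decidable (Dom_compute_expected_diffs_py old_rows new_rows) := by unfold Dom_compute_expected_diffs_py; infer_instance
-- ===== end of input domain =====

-- B replaces A's two set differences and two formatting loops by one signed counter
-- dictionary (-1 per old row, +1 per new row) whose nonzero entries are exactly the
-- diffs, the count being the printed sign (objective: alternative).
-- Set arguments/result follow the convention: lists of distinct elements, compared as sets.

-- f"{event_time},{data},{cs},{sign}"  (shared formatting of one row; exact: str(int) = PySem.Int.toStr)
def pvFmtRow (row : Int × String × Int) (sign : String) : String :=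
  PySem.Int.toStr row.1 ++ "," ++ row.2.1 ++ "," ++ PySem.Int.toStr row.2.2 ++ "," ++ sign

-- ===== PORT A =====
def compute_expected_diffs_py (old_rows : List (Int × String × Int)) (new_rows : List (Int × String × Int)) : List String :=
  let olds : PySem.Set (Int × String × Int) := PySem.Set.ofList old_rows
  let news : PySem.Set (Int × String × Int) := PySem.Set.ofList new_rows
  let removed := PySem.Set.diff olds news
  let added := PySem.Set.diff news olds
  let expected : PySem.Set String :=
    removed.foldl (fun e row => PySem.Set.add e (pvFmtRow row "-1")) PySem.Set.empty
  added.foldl (fun e row => PySem.Set.add e (pvFmtRow row "1")) expected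

-- ===== PORT B =====
def compute_expected_diffs_py_alt (old_rows : List (Int × String × Int)) (new_rows : List (Int × String × Int)) : List String :=
  let counts0 : PySem.Dict (Int × String × Int) Int :=
    old_rows.foldl (fun d row => d.insert row (d.getD row 0 - 1)) PySem.Dict.empty
  let counts : PySem.Dict (Int × String × Int) Int :=
    new_rows.foldl (fun d row => d.insert row (d.getD row 0 + 1)) counts0
  counts.items.foldl
    (fun e p => if p.2 ≠ 0 then PySem.Set.add e (pvFmtRow p.1 (PySem.Int.toStr p.2)) else e)
    PySem.Set.empty

-- ===== PRECONDITION & SPEC =====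
-- Pre_ states only the set-argument encoding of the type convention: the input lists hold
-- the DISTINCT elements of the Python set arguments; it excludes no Python input of A.
def Pre_compute_expected_diffs_py (old_rows : List (Int × String × Int)) (new_rows : List (Int × String × Int)) : Prop :=
  old_rows.Nodup ∧ new_rows.Nodup
instance (old_rows : List (Int × String × Int)) (new_rows : List (Int × String × Int)) : Decidable (Pre_compute_expected_diffs_py old_rows new_rows) := by unfold Pre_compute_expected_diffs_py; infer_instance

def pvWitness_compute_expected_diffs_py : (List (Int × String × Int)) × (List (Int × String × Int)) :=
  ([(10, "a", 10), (11, "b", 11)], [(11, "b", 11), (12, "c", 12)])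

def Spec_compute_expected_diffs_py (old_rows : List (Int × String × Int)) (new_rows : List (Int × String × Int)) (out : List String) : Prop := out = compute_expected_diffs_py_alt old_rows new_rows
instance (old_rows : List (Int × String × Int)) (new_rows : List (Int × String × Int)) (out : List String) : Decidable (Spec_compute_expected_diffs_py old_rows new_rows out) := by unfold Spec_compute_expected_diffs_py; infer_instance

-- ===== CLAIM (what is proved, stated in full; the proofs are below) =====
def Claim_equal_compute_expected_diffs_py : Prop := ∀ (old_rows : List (Int × String × Int)) (new_rows : List (Int × String × Int)), Dom_compute_expected_diffs_py old_rows new_rows → Pre_compute_expected_diffs_py old_rows new_rows → Spec_compute_expected_diffs_py old_rows new_rows (compute_expected_diffs_py old_rows new_rows)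

-- ===== LEMMAS AND PROOFS =====

-- The old-rows counting loop over fresh distinct keys appends (key, -1) entries.
theorem pv_fold_old (l : List (Int × String × Int)) (hl : l.Nodup)
    (d : PySem.Dict (Int × String × Int) Int) (hf : ∀ r ∈ l, d.contains r = false) :
    (l.foldl (fun d row => d.insert row (d.getD row 0 - 1)) d).items
      = d.items ++ l.map (fun r => (r, (-1 : Int))) := by
  induction l generalizing d with
  | nil => simp
  | cons x xs ih =>
      have hcx : d.contains x = false := hf x List.mem_cons_self
      have hgd : d.getD x 0 = 0 := PySem.Dict.getD_of_not_contains d 0 hcx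
      simp only [List.foldl_cons, List.map_cons]
      rw [ih hl.of_cons (d.insert x (d.getD x 0 - 1))
            (fun r hr => by
              rw [PySem.Dict.contains_insert]
              have : r ≠ x := fun h => (List.nodup_cons.mp hl).1 (h ▸ hr)
              simp [this, hf r (List.mem_cons_of_mem _ hr)])]
      rw [PySem.Dict.items_insert_of_not_contains d _ hcx, hgd]
      simp

-- The new-rows counting loop bumps present keys in place and appends fresh ones with value 1.
theorem pv_fold_new (l : List (Int × String × Int)) (hl : l.Nodup)
    (d : PySem.Dict (Int × String × Int) Int) (hk : d.keys.Nodup) :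
    (l.foldl (fun d row => d.insert row (d.getD row 0 + 1)) d).items
      = d.items.map (fun p => if p.1 ∈ l then (p.1, p.2 + 1) else p)
        ++ (l.filter (fun r => !d.contains r)).map (fun r => (r, (1 : Int))) := by
  induction l generalizing d with
  | nil => simp
  | cons x xs ih =>
      have hx : x ∉ xs := (List.nodup_cons.mp hl).1
      simp only [List.foldl_cons]
      rw [ih hl.of_cons (d.insert x (d.getD x 0 + 1)) (PySem.Dict.nodup_keys_insert d x _ hk)]
      by_cases hc : d.contains x = true
      · rw [PySem.Dict.items_insert_of_contains d _ hc]
        rw [List.map_map]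
        have hmap : ∀ p ∈ d.items,
            ((fun p => if p.1 ∈ xs then (p.1, p.2 + 1) else p) ∘
              (fun p => if p.1 == x then (x, d.getD x 0 + 1) else p)) p
              = (fun p => if p.1 ∈ x :: xs then (p.1, p.2 + 1) else p) p := by
          intro p hp
          by_cases hpx : p.1 = x
          · have : d.getD p.1 0 = p.2 := PySem.Dict.getD_of_mem_items d hp hk 0
            simp [hpx, hx, ← this]
          · simp [hpx, Function.comp]
        rw [List.map_congr_left hmap]
        have hfil : xs.filter (fun r => !(d.insert x (d.getD x 0 + 1)).contains r)
            = (x :: xs).filter (fun r => !d.contains r) := by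
          have hdrop : (x :: xs).filter (fun r => !d.contains r)
              = xs.filter (fun r => !d.contains r) := by
            simp [hc]
          rw [hdrop]
          apply List.filter_congr
          intro r hr
          rw [PySem.Dict.contains_insert]
          have : r ≠ x := fun h => hx (h ▸ hr)
          simp [this]
        rw [hfil]
      · have hc' : d.contains x = false := by simpa using hc
        have hgd : d.getD x 0 = 0 := PySem.Dict.getD_of_not_contains d 0 hc'
        rw [PySem.Dict.items_insert_of_not_contains d _ hc', hgd]
        rw [List.map_append]
        have hmap : ∀ p ∈ d.items,
            (fun p => if p.1 ∈ xs then (p.1, p.2 + 1) else p) p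
              = (fun p => if p.1 ∈ x :: xs then (p.1, p.2 + 1) else p) p := by
          intro p hp
          have hpk : p.1 ∈ d.keys := PySem.Dict.mem_keys_of_mem_items d hp
          have hpx : p.1 ≠ x := by
            intro h
            rw [← PySem.Dict.contains_iff_mem_keys] at hpk
            rw [h] at hpk; rw [hpk] at hc'; exact Bool.true_eq_false.mp hc'
          simp [hpx]
        rw [List.map_congr_left hmap]
        have hfil : xs.filter (fun r => !(d.insert x (0 + 1)).contains r)
            = xs.filter (fun r => !d.contains r) := by
          apply List.filter_congr
          intro r hr
          rw [PySem.Dict.contains_insert]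
          have : r ≠ x := fun h => hx (h ▸ hr)
          simp [this]
        rw [hfil, List.filter_cons]
        simp [hc', hx]

-- Emitting the old half: entries (r, 0) are skipped, entries (r, -1) add the "-1" string.
theorem pv_emit_old (c : (Int × String × Int) → Bool) (l : List (Int × String × Int))
    (init : PySem.Set String) :
    (l.map (fun r => if c r then (r, (0 : Int)) else (r, -1))).foldl
        (fun e p => if p.2 ≠ 0 then PySem.Set.add e (pvFmtRow p.1 (PySem.Int.toStr p.2)) else e)
        init
      = (l.filter (fun r => !c r)).foldl
          (fun e row => PySem.Set.add e (pvFmtRow row "-1")) init := by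
  induction l generalizing init with
  | nil => rfl
  | cons x xs ih =>
      have hm1 : PySem.Int.toStr (-1 : Int) = "-1" := by decide
      by_cases hc : c x = true
      · simpa [hc] using ih init
      · simpa [hc, hm1] using ih (PySem.Set.add init (pvFmtRow x "-1"))

-- Emitting the added half: every entry (r, 1) adds the "1" string.
theorem pv_emit_new (l : List (Int × String × Int)) (init : PySem.Set String) :
    (l.map (fun r => (r, (1 : Int)))).foldl
        (fun e p => if p.2 ≠ 0 then PySem.Set.add e (pvFmtRow p.1 (PySem.Int.toStr p.2)) else e)
        init
      = l.foldl (fun e row => PySem.Set.add e (pvFmtRow row "1")) init := by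
  induction l generalizing init with
  | nil => rfl
  | cons x xs ih =>
      have h1 : PySem.Int.toStr (1 : Int) = "1" := by decide
      simp only [List.map_cons, List.foldl_cons, h1, if_pos (by decide : (1 : Int) ≠ 0)]
      exact ih _

-- ===== VERDICT (by name: the statement is the Claim_ definition above) =====
theorem compute_expected_diffs_py_spec : Claim_equal_compute_expected_diffs_py := by
  intro old_rows new_rows _ hpre
  obtain ⟨hno, hnn⟩ := hpre
  unfold Spec_compute_expected_diffs_py
  unfold compute_expected_diffs_py compute_expected_diffs_py_alt
  simp only [PySem.Set.ofList_eq_self_of_nodup old_rows hno,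
    PySem.Set.ofList_eq_self_of_nodup new_rows hnn]
  -- characterize B's counter dictionary
  have h1 := pv_fold_old old_rows hno PySem.Dict.empty (fun r _ => by simp)
  set d1 : PySem.Dict (Int × String × Int) Int := old_rows.foldl (fun d row => d.insert row (d.getD row 0 - 1)) PySem.Dict.empty with hd1
  have h1' : d1.items = old_rows.map (fun r => (r, (-1 : Int))) := by simpa [PySem.Dict.empty] using h1
  have hk1 : d1.keys = old_rows := by
    show d1.items.map (·.1) = old_rows
    rw [h1', List.map_map]
    exact (List.map_congr_left (fun r _ => rfl)).trans (List.map_id _)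
  have hcont1 : ∀ r, d1.contains r = old_rows.contains r := by
    intro r
    by_cases hr : r ∈ old_rows
    · have : d1.contains r = true := by rw [PySem.Dict.contains_iff_mem_keys, hk1]; exact hr
      simp [this, hr]
    · have : ¬ (d1.contains r = true) := by rw [PySem.Dict.contains_iff_mem_keys, hk1]; exact hr
      simp only [Bool.not_eq_true] at this
      simp [this, hr]
  have h2 := pv_fold_new new_rows hnn d1 (hk1 ▸ hno)
  rw [h1'] at h2
  rw [List.map_map] at h2
  rw [h2]
  rw [List.foldl_append]
  have hmap : old_rows.map
        ((fun p => if p.1 ∈ new_rows then (p.1, p.2 + 1) else p) ∘ (fun r => (r, (-1 : Int))))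
      = old_rows.map (fun r => if new_rows.contains r then (r, (0 : Int)) else (r, -1)) := by
    apply List.map_congr_left
    intro r _
    by_cases hr : r ∈ new_rows <;> simp [hr, Function.comp]
  rw [hmap, pv_emit_old]
  have hfil' : new_rows.filter (fun r => !d1.contains r)
      = new_rows.filter (fun r => !old_rows.contains r) := by
    apply List.filter_congr; intro r _; rw [hcont1]
  rw [hfil', pv_emit_new]
  -- A's side: unfold the set differences to the same filters
  simp only [PySem.Set.diff, PySem.Set.contains]
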